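-- pv_equiv track=rewrite | github.com/joemissamore/cs415_project02 | create_reverse_lists.py | create_reverse_lists
-- ===== SOURCE A (Python) =====
-- def create_reverse_lists(a, b):
--     LA = []
--     LB = []
--     # appends integer in reverse order
--     while a > 0:
--         LA.append(a % 10)
--         a = a // 10
--     while b > 0:
--         LB.append(b % 10)
--         b = b // 10
--     # adds extra 0's to make lists the same size
--     if (len(LA) > len(LB)):
--         LB = LB + [0] * (len(LA) - len(LB))
--     if (len(LB) > len(LA)):
--         LA = LA + [0] * (len(LB) - len(LA))
--     return LA, LB
-- ===== SOURCE B (Python) =====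
-- def create_reverse_lists(a, b):
--     # digit count; non-positive numbers contribute no digits
--     def ndigits(n):
--         c = 0
--         while n > 0:
--             c += 1
--             n //= 10
--         return c
--     a = max(a, 0)
--     b = max(b, 0)
--     maxlen = max(ndigits(a), ndigits(b))
--     LA = []
--     LB = []
--     for _ in range(maxlen):
--         LA.append(a % 10)
--         LB.append(b % 10)
--         a //= 10
--         b //= 10
--     return LA, LB
-- ===== Notes on version B (the rewrite author's own statement) =====
-- stated objective: alternative
-- what changed: Instead of two digit-extraction loops followed by explicit [0]*diff padding, B counts the digits of each number first and then runs a single counted loop of max-length extracting one digit of each number per iteration, so the zero-padding arises from 0 % 10 == 0 with no concatenation step.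
import Mathlib
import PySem

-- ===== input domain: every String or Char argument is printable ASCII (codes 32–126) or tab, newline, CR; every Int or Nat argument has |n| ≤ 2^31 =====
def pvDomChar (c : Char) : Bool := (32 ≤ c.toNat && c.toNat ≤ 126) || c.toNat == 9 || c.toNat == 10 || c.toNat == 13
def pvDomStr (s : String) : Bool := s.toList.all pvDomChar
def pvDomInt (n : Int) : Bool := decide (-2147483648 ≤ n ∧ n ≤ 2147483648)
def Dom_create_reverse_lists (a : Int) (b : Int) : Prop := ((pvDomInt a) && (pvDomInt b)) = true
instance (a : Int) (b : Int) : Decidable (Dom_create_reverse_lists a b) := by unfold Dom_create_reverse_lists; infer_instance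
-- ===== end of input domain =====

-- B replaces A's two digit loops + explicit [0]* padding by a digit count and one counted
-- loop of max length per iteration extracting one digit of each number (alternative decomposition).


-- ===== PORT A =====
-- 'while n > 0: L.append(n % 10); n = n // 10' (digit-extraction loop, used for a and b)
def digitsRevA (n : Int) : List Int :=
  if h : n > 0 then PySem.Int.mod n 10 :: digitsRevA (PySem.Int.floordiv n 10)
  else []
termination_by n.toNat
decreasing_by
  have : PySem.Int.floordiv n 10 = n / 10 := PySem.Int.floordiv_eq_ediv_of_pos (by omega)
  rw [this]; omega

def create_reverse_lists (a : Int) (b : Int) : List Int × List Int :=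
  let LA := digitsRevA a
  let LB := digitsRevA b
  let LB := if LA.length > LB.length then LB ++ List.replicate (LA.length - LB.length) 0 else LB
  let LA := if LB.length > LA.length then LA ++ List.replicate (LB.length - LA.length) 0 else LA
  (LA, LB)

-- ===== PORT B =====
-- 'c = 0; while n > 0: c += 1; n //= 10; return c'
def ndigitsB (n : Int) : Int :=
  if h : n > 0 then ndigitsB (PySem.Int.floordiv n 10) + 1
  else 0
termination_by n.toNat
decreasing_by
  have : PySem.Int.floordiv n 10 = n / 10 := PySem.Int.floordiv_eq_ediv_of_pos (by omega)
  rw [this]; omega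

-- 'for _ in range(maxlen): LA.append(a % 10); LB.append(b % 10); a //= 10; b //= 10'
def loopB (k : Nat) (LA LB : List Int) (a b : Int) : List Int × List Int :=
  match k with
  | 0 => (LA, LB)
  | k + 1 =>
      loopB k (LA ++ [PySem.Int.mod a 10]) (LB ++ [PySem.Int.mod b 10])
        (PySem.Int.floordiv a 10) (PySem.Int.floordiv b 10)

def create_reverse_lists_alt (a : Int) (b : Int) : List Int × List Int :=
  let a := max a 0
  let b := max b 0
  let maxlen := max (ndigitsB a) (ndigitsB b)
  loopB maxlen.toNat [] [] a b

-- ===== PRECONDITION & SPEC =====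
def Spec_create_reverse_lists (a : Int) (b : Int) (out : List Int × List Int) : Prop := out = create_reverse_lists_alt a b
instance (a : Int) (b : Int) (out : List Int × List Int) : Decidable (Spec_create_reverse_lists a b out) := by unfold Spec_create_reverse_lists; infer_instance

-- ===== CLAIM (what is proved, stated in full; the proofs are below) =====
def Claim_equal_create_reverse_lists : Prop := ∀ (a : Int) (b : Int), Dom_create_reverse_lists a b → Spec_create_reverse_lists a b (create_reverse_lists a b)

-- ===== LEMMAS AND PROOFS =====

-- k iterations of the single-number part of B's loop body, front-recursively
def padDigits (n : Int) (k : Nat) : List Int :=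
  match k with
  | 0 => []
  | k + 1 => PySem.Int.mod n 10 :: padDigits (PySem.Int.floordiv n 10) k

theorem loopB_eq (k : Nat) (LA LB : List Int) (a b : Int) :
    loopB k LA LB a b = (LA ++ padDigits a k, LB ++ padDigits b k) := by
  induction k generalizing LA LB a b with
  | zero => simp [loopB, padDigits]
  | succ k ih => simp [loopB, padDigits, ih]

theorem ndigitsB_eq (n : Int) : ndigitsB n = ((digitsRevA n).length : Int) := by
  induction n using ndigitsB.induct with
  | case1 n h ih =>
      rw [ndigitsB, digitsRevA, dif_pos h, dif_pos h, ih]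
      simp
  | case2 n h => rw [ndigitsB, digitsRevA, dif_neg h, dif_neg h]; simp

theorem digitsRevA_nonpos (n : Int) (h : ¬ n > 0) : digitsRevA n = [] := by
  rw [digitsRevA]; simp [h]

theorem digitsRevA_max (n : Int) : digitsRevA (max n 0) = digitsRevA n := by
  by_cases h : n > 0
  · have : max n 0 = n := by omega
    rw [this]
  · rw [digitsRevA_nonpos n h, digitsRevA_nonpos _ (by omega)]

theorem padDigits_eq (n : Int) (hn : 0 ≤ n) (k : Nat)
    (hk : (digitsRevA n).length ≤ k) :
    padDigits n k = digitsRevA n ++ List.replicate (k - (digitsRevA n).length) 0 := by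
  induction k generalizing n with
  | zero =>
      have : digitsRevA n = [] := List.eq_nil_of_length_eq_zero (by omega)
      simp [padDigits, this]
  | succ k ih =>
      by_cases h : n > 0
      · rw [digitsRevA, dif_pos h] at hk ⊢
        simp only [List.length_cons] at hk
        have hd : (0:Int) ≤ PySem.Int.floordiv n 10 := by
          rw [PySem.Int.floordiv_eq_ediv_of_pos (by omega)]; omega
        rw [padDigits, ih _ hd (by omega)]
        simp [Nat.succ_sub_succ]
      · have h0 : n = 0 := by omega
        subst h0
        have hm : PySem.Int.mod 0 10 = 0 := by decide
        have hf : PySem.Int.floordiv 0 10 = 0 := by decide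
        rw [digitsRevA_nonpos 0 (by omega)] at *
        rw [padDigits, hm, hf, ih 0 (by omega) (by rw [digitsRevA_nonpos 0 (by omega)]; simp)]
        simp [List.replicate_succ, digitsRevA_nonpos 0 (by omega)]

-- ===== VERDICT (by name: the statement is the Claim_ definition above) =====
theorem create_reverse_lists_spec : Claim_equal_create_reverse_lists := by
  intro a b _
  unfold Spec_create_reverse_lists create_reverse_lists create_reverse_lists_alt
  simp only [loopB_eq, ndigitsB_eq, digitsRevA_max, List.nil_append]
  set la := digitsRevA a with hla
  set lb := digitsRevA b with hlb
  have hna : 0 ≤ max a 0 := by omega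
  have hnb : 0 ≤ max b 0 := by omega
  have htn : (max ((la.length : Int)) ((lb.length : Int))).toNat = max la.length lb.length := by omega
  rw [htn]
  have h1 : padDigits (max a 0) (max la.length lb.length)
      = la ++ List.replicate (max la.length lb.length - la.length) 0 := by
    rw [← digitsRevA_max a] at hla
    rw [hla, padDigits_eq _ hna _ (by omega)]
  have h2 : padDigits (max b 0) (max la.length lb.length)
      = lb ++ List.replicate (max la.length lb.length - lb.length) 0 := by
    rw [← digitsRevA_max b] at hlb
    rw [hlb, padDigits_eq _ hnb _ (by omega)]
  rw [h1, h2]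
  by_cases hab : lb.length < la.length
  · rw [if_pos (show la.length > lb.length from hab)]
    have hlen : (lb ++ List.replicate (la.length - lb.length) (0:Int)).length = la.length := by
      simp only [List.length_append, List.length_replicate]; omega
    rw [if_neg (show ¬ (lb ++ List.replicate (la.length - lb.length) (0:Int)).length > la.length by
      rw [hlen]; omega)]
    have hm1 : max la.length lb.length - la.length = 0 := by omega
    have hm2 : max la.length lb.length - lb.length = la.length - lb.length := by omega
    rw [hm1, hm2]
    simp
  · rw [if_neg (show ¬ la.length > lb.length by omega)]
    by_cases h2 : la.length < lb.length
    · rw [if_pos (show lb.length > la.length from h2)]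
      have hm1 : max la.length lb.length - la.length = lb.length - la.length := by omega
      have hm2 : max la.length lb.length - lb.length = 0 := by omega
      rw [hm1, hm2]
      simp
    · rw [if_neg (show ¬ lb.length > la.length by omega)]
      have hm1 : max la.length lb.length - la.length = 0 := by omega
      have hm2 : max la.length lb.length - lb.length = 0 := by omega
      rw [hm1, hm2]
      simp
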